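-- pv_equiv track=rewrite | github.com/JaysonHahn/CS4744-Final | fcfg-to-cfg.py | _extract_symbol
-- ===== SOURCE A (Python) =====
-- def _extract_symbol(signature):
--     # For slash notation, we need to extract symbols from both sides
--     if '/' in signature:
--         parts = signature.split('/')
--         symbols = []
--         for part in parts:
--             # Extract symbol (everything before '[' if it exists)
--             if '[' in part:
--                 symbols.append(part.split('[', 1)[0])
--             else:
--                 symbols.append(part)
--         return '/'.join(symbols)
--
--     # Simple case - no slash
--     if '[' in signature:
--         return signature.split('[', 1)[0]
--     return signature
-- ===== SOURCE B (Python) =====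
-- def _extract_symbol(signature):
--     # Single left-to-right pass: an opening bracket turns skipping on, a slash
--     # turns it off (and is kept); everything else is kept unless skipping.
--     out = []
--     skip = False
--     for ch in signature:
--         if ch == '/':
--             skip = False
--             out.append(ch)
--         elif ch == '[':
--             skip = True
--         elif not skip:
--             out.append(ch)
--     return ''.join(out)
-- ===== Notes on version B (the rewrite author's own statement) =====
-- stated objective: alternative
-- what changed: Replaces the split-on-slash plus per-part bracket-split plus rejoin with a single character-by-character scan that maintains a skip flag (turned on by an opening bracket, off by a slash separator).
import Mathlib
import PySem

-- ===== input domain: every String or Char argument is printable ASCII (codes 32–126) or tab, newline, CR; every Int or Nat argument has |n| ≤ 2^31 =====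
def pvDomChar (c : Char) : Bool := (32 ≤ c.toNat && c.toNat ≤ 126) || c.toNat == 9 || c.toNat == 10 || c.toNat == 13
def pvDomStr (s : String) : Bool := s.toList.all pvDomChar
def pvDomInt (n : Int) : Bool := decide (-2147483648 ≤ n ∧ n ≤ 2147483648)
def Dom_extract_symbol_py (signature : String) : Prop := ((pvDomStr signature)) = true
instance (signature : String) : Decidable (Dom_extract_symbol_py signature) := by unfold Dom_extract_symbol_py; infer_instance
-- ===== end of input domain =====

-- B replaces A's split-on-slash / per-part bracket split / rejoin with a single
-- character scan carrying a skip flag; structurally different, same cost.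

-- ===== PORT A =====
-- the bracket split always yields a nonempty list and its separator is nonempty,
-- so the .getD totalizers below are never hit (exact).
def extract_symbol_py (signature : String) : String :=
  if PySem.Str.isIn "/" signature then
    let parts := (PySem.Str.split? signature "/").getD []
    let symbols := parts.foldl (fun symbols part =>
      if PySem.Str.isIn "[" part then
        symbols ++ [(PySem.List.pyGet? ((PySem.Str.splitMax? part "[" 1).getD []) 0).getD ""]
      else
        symbols ++ [part]) []
    PySem.Str.join "/" symbols
  else if PySem.Str.isIn "[" signature then
    (PySem.List.pyGet? ((PySem.Str.splitMax? signature "[" 1).getD []) 0).getD ""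
  else signature

-- ===== PORT B =====
def extract_symbol_py_alt (signature : String) : String :=
  String.ofList (signature.toList.foldl (fun (acc : List Char × Bool) ch =>
      if ch = '/' then (acc.1 ++ [ch], false)
      else if ch = '[' then (acc.1, true)
      else if acc.2 = false then (acc.1 ++ [ch], acc.2)
      else acc) ([], false)).1

-- ===== PRECONDITION & SPEC =====
def Spec_extract_symbol_py (signature : String) (out : String) : Prop := out = extract_symbol_py_alt signature
instance (signature : String) (out : String) : Decidable (Spec_extract_symbol_py signature out) := by unfold Spec_extract_symbol_py; infer_instance

-- ===== CLAIM (what is proved, stated in full; the proofs are below) =====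
def Claim_equal_extract_symbol_py : Prop := ∀ (signature : String), Dom_extract_symbol_py signature → Spec_extract_symbol_py signature (extract_symbol_py signature)

-- ===== LEMMAS AND PROOFS =====

-- everything before the first '[' of cs
def pvCut (cs : List Char) : List Char := cs.takeWhile (fun c => c != '[')

-- splitting on '/' as a structural recursion
def pvSplit : List Char → List (List Char)
  | [] => [[]]
  | c :: r =>
    if c = '/' then [] :: pvSplit r
    else
      match pvSplit r with
      | [] => [[c]]
      | h :: t => (c :: h) :: t

-- B's scan, as a structural recursion
def pvScan : Bool → List Char → List Char
  | _, [] => []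
  | skip, c :: r =>
    if c = '/' then '/' :: pvScan false r
    else if c = '[' then pvScan true r
    else if skip then pvScan skip r
    else c :: pvScan skip r

def pvConsH (x : List Char) : List (List Char) → List (List Char)
  | [] => [x]
  | h :: t => (x ++ h) :: t

def pvJ : List (List Char) → List Char
  | [] => []
  | h :: t => '/' :: PySem.Chars.join ['/'] ((h :: t).map pvCut)

theorem pvSplit_ne_nil (cs : List Char) : pvSplit cs ≠ [] := by
  cases cs with
  | nil => simp [pvSplit]
  | cons c r =>
    simp only [pvSplit]
    split_ifs
    · simp
    · rcases h : pvSplit r with _ | ⟨h', t⟩ <;> simp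

theorem pvConsH_nil (l : List (List Char)) (h : l ≠ []) : pvConsH [] l = l := by
  cases l with
  | nil => exact absurd rfl h
  | cons a t => simp [pvConsH]

-- foldl of B's step computes pvScan
theorem foldl_step_eq (cs : List Char) : ∀ (out : List Char) (skip : Bool),
    (cs.foldl (fun (acc : List Char × Bool) ch =>
      if ch = '/' then (acc.1 ++ [ch], false)
      else if ch = '[' then (acc.1, true)
      else if acc.2 = false then (acc.1 ++ [ch], acc.2)
      else acc) (out, skip)).1 = out ++ pvScan skip cs := by
  induction cs with
  | nil => intro out skip; simp [pvScan]
  | cons c r ih =>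
    intro out skip
    simp only [List.foldl_cons, pvScan]
    by_cases h1 : c = '/'
    · simp [h1, ih]
    · by_cases h2 : c = '['
      · simp [h2, ih]
      · cases skip with
        | false => simp [h1, h2, ih]
        | true => simp [h1, h2, ih]

-- Chars.splitOn.go on a single-char separator '/'
theorem go_split : ∀ (fuel : Nat) (l cur : List Char) (acc : List (List Char)),
    l.length ≤ fuel →
    PySem.Chars.splitOn.go ['/'] fuel l cur acc
      = acc.reverse ++ pvConsH cur.reverse (pvSplit l) := by
  intro fuel
  induction fuel with
  | zero =>
    intro l cur acc h
    have : l = [] := List.length_eq_zero_iff.mp (Nat.le_zero.mp h)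
    subst this
    simp [PySem.Chars.splitOn.go, pvSplit, pvConsH]
  | succ n ih =>
    intro l cur acc h
    cases l with
    | nil => simp [PySem.Chars.splitOn.go, pvSplit, pvConsH]
    | cons c rest =>
      simp only [PySem.Chars.splitOn.go]
      by_cases hc : c = '/'
      · subst hc
        have hpre : List.isPrefixOf ['/'] ('/' :: rest) = true := by
          simp [List.isPrefixOf]
        rw [if_pos hpre]
        have hlen : rest.length ≤ n := by simpa using h
        rw [ih _ [] (cur.reverse :: acc) (by simpa using hlen)]
        simp only [List.length_cons, List.length_nil, Nat.zero_add, List.drop_succ_cons,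
          List.drop_zero, List.reverse_nil]
        rw [pvConsH_nil _ (pvSplit_ne_nil rest)]
        simp [pvSplit, pvConsH]
      · have hpre : List.isPrefixOf ['/'] (c :: rest) = false := by
          simp [List.isPrefixOf]
          exact fun hc' => hc hc'.symm
        rw [if_neg (by simp [hpre])]
        have hlen : rest.length ≤ n := by simpa using h
        rw [ih rest (c :: cur) acc hlen]
        simp only [pvSplit, if_neg hc]
        rcases hps : pvSplit rest with _ | ⟨h', t⟩
        · exact absurd hps (pvSplit_ne_nil rest)
        · simp [pvConsH]

theorem splitOn_slash (cs : List Char) :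
    PySem.Chars.splitOn cs ['/'] = pvSplit cs := by
  unfold PySem.Chars.splitOn
  rw [go_split (cs.length + 1) cs [] [] (Nat.le_succ _)]
  simp [pvConsH_nil _ (pvSplit_ne_nil cs)]

-- Chars.splitOnMax.go once the budget is exhausted: one chunk, the rest of l
theorem go_max_zero : ∀ (fuel : Nat) (l : List Char) (acc : List (List Char)),
    PySem.Chars.splitOnMax.go ['['] fuel 0 l [] acc = acc.reverse ++ [l] := by
  intro fuel l acc
  cases fuel with
  | zero => simp [PySem.Chars.splitOnMax.go]
  | succ n =>
    cases l with
    | nil => simp [PySem.Chars.splitOnMax.go]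
    | cons c rest => simp [PySem.Chars.splitOnMax.go]

-- head of Chars.splitOnMax.go with maxsplit 1 on separator '['
theorem go_max_head : ∀ (fuel : Nat) (l cur : List Char),
    l.length ≤ fuel →
    ∃ rest, PySem.Chars.splitOnMax.go ['['] fuel 1 l cur []
      = (cur.reverse ++ pvCut l) :: rest := by
  intro fuel
  induction fuel with
  | zero =>
    intro l cur h
    have : l = [] := List.length_eq_zero_iff.mp (Nat.le_zero.mp h)
    subst this
    exact ⟨[], by simp [PySem.Chars.splitOnMax.go, pvCut]⟩
  | succ n ih =>
    intro l cur h
    cases l with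
    | nil => exact ⟨[], by simp [PySem.Chars.splitOnMax.go, pvCut]⟩
    | cons c rest =>
      simp only [PySem.Chars.splitOnMax.go]
      by_cases hc : c = '['
      · subst hc
        have hpre : List.isPrefixOf ['['] ('[' :: rest) = true := by
          simp [List.isPrefixOf]
        rw [if_neg (by omega), if_pos hpre]
        refine ⟨[List.drop 1 ('[' :: rest)], ?_⟩
        rw [show (1 : Nat) - 1 = 0 from rfl, go_max_zero]
        simp [pvCut]
      · have hpre : List.isPrefixOf ['['] (c :: rest) = false := by
          simp [List.isPrefixOf]
          exact fun hc' => hc hc'.symm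
        rw [if_neg (by omega), if_neg (by simp [hpre])]
        have hlen : rest.length ≤ n := by simpa using h
        obtain ⟨r', hr'⟩ := ih rest (c :: cur) hlen
        refine ⟨r', ?_⟩
        rw [hr']
        have hbne : (c != '[') = true := bne_iff_ne.mpr hc
        simp [pvCut, List.takeWhile, hbne]

theorem splitOnMax_head (cs : List Char) :
    ∃ rest, PySem.Chars.splitOnMax cs ['['] 1 = pvCut cs :: rest := by
  unfold PySem.Chars.splitOnMax
  rw [if_neg (by omega)]
  obtain ⟨r, hr⟩ := go_max_head (cs.length + 1) cs [] (Nat.le_succ _)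
  exact ⟨r, by simpa using hr⟩

theorem cut_of_not_mem (cs : List Char) (h : '[' ∉ cs) : pvCut cs = cs := by
  induction cs with
  | nil => rfl
  | cons c r ih =>
    simp only [List.mem_cons, not_or] at h
    have hne : c ≠ '[' := fun e => h.1 e.symm
    have hbne : (c != '[') = true := bne_iff_ne.mpr hne
    simp only [pvCut, List.takeWhile]
    rw [hbne]
    simp only [pvCut] at ih
    simp [ih h.2]

theorem mem_iff_singleton_infix (a : Char) (l : List Char) :
    [a] <:+: l ↔ a ∈ l := by
  constructor
  · intro h
    exact (List.singleton_sublist).mp h.sublist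
  · intro h
    obtain ⟨s, t, hst⟩ := List.append_of_mem h
    exact ⟨s, t, by simp [hst]⟩

theorem join_decomp (h : List Char) (t : List (List Char)) :
    PySem.Chars.join ['/'] ((h :: t).map pvCut) = pvCut h ++ pvJ t := by
  cases t with
  | nil => simp [PySem.Chars.join_singleton, pvJ]
  | cons q r =>
    simp only [List.map_cons, pvJ]
    rw [PySem.Chars.join_cons_cons]
    simp

-- the central identity: B's scan = cut each '/'-part, rejoin with '/'
theorem scan_eq_join (cs : List Char) :
    pvScan false cs = PySem.Chars.join ['/'] ((pvSplit cs).map pvCut)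
    ∧ pvScan true cs = pvJ (pvSplit cs).tail := by
  induction cs with
  | nil => simp [pvScan, pvSplit, pvCut, PySem.Chars.join_singleton, pvJ]
  | cons c r ih =>
    obtain ⟨ih1, ih2⟩ := ih
    rcases hps : pvSplit r with _ | ⟨h, t⟩
    · exact absurd hps (pvSplit_ne_nil r)
    by_cases hc : c = '/'
    · subst hc
      have hsc1 : pvScan false ('/' :: r) = '/' :: pvScan false r := by simp [pvScan]
      have hsc2 : pvScan true ('/' :: r) = '/' :: pvScan false r := by simp [pvScan]
      have hsp : pvSplit ('/' :: r) = [] :: h :: t := by simp [pvSplit, hps]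
      constructor
      · rw [hsc1, hsp, List.map_cons, List.map_cons, PySem.Chars.join_cons_cons, ih1, hps]
        simp [pvCut]
      · rw [hsc2, hsp]
        simp only [List.tail_cons, pvJ]
        rw [ih1, hps]
    · by_cases hb : c = '['
      · subst hb
        have hsc1 : pvScan false ('[' :: r) = pvScan true r := by simp [pvScan]
        have hsc2 : pvScan true ('[' :: r) = pvScan true r := by simp [pvScan]
        have hsp : pvSplit ('[' :: r) = ('[' :: h) :: t := by simp [pvSplit, hps]
        have hcut : pvCut ('[' :: h) = [] := by simp [pvCut, List.takeWhile]
        constructor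
        · rw [hsc1, ih2, hps, hsp, join_decomp, hcut]
          simp
        · rw [hsc2, ih2, hps, hsp]
          simp
      · have hbne : (c != '[') = true := bne_iff_ne.mpr hb
        have hsc1 : pvScan false (c :: r) = c :: pvScan false r := by simp [pvScan, hc, hb]
        have hsc2 : pvScan true (c :: r) = pvScan true r := by simp [pvScan, hc, hb]
        have hsp : pvSplit (c :: r) = (c :: h) :: t := by simp [pvSplit, hc, hps]
        have hcut : pvCut (c :: h) = c :: pvCut h := by
          simp only [pvCut, List.takeWhile]; rw [hbne]
        constructor
        · rw [hsc1, ih1, hps, hsp, join_decomp, join_decomp, hcut]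
          simp
        · rw [hsc2, ih2, hps, hsp]
          simp

theorem split_no_slash (cs : List Char) (h : '/' ∉ cs) : pvSplit cs = [cs] := by
  induction cs with
  | nil => rfl
  | cons c r ih =>
    simp only [List.mem_cons, not_or] at h
    have hne : ¬c = '/' := fun e => h.1 e.symm
    simp [pvSplit, if_neg hne, ih h.2]

-- the alt port computes pvScan
theorem alt_eq_scan (s : String) :
    extract_symbol_py_alt s = String.ofList (pvScan false s.toList) := by
  unfold extract_symbol_py_alt
  rw [foldl_step_eq s.toList [] false]
  simp

-- the bracket-stripping expression of port A computes pvCut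
theorem strip_eq_cut (p : List Char) :
    (PySem.List.pyGet? ((PySem.Str.splitMax? (String.ofList p) "[" 1).getD []) 0).getD ""
      = String.ofList (pvCut p) := by
  unfold PySem.Str.splitMax?
  rw [show ("[" : String).toList = ['['] from rfl]
  simp only [String.toList_ofList]
  unfold PySem.Chars.splitMax?
  rw [if_neg (by simp)]
  obtain ⟨rest, hr⟩ := splitOnMax_head p
  rw [hr]
  simp [PySem.List.pyGet?, PySem.List.pyIdx?]

-- ===== VERDICT (by name: the statement is the Claim_ definition above) =====
theorem extract_symbol_py_spec : Claim_equal_extract_symbol_py := by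
  intro s _
  unfold Spec_extract_symbol_py
  rw [alt_eq_scan]
  unfold extract_symbol_py
  by_cases hs : PySem.Str.isIn "/" s = true
  · rw [if_pos hs]
    have hsplit : PySem.Str.split? s "/" = some ((pvSplit s.toList).map String.ofList) := by
      unfold PySem.Str.split? PySem.Chars.split?
      rw [if_neg (by simp [show ("/" : String).toList = ['/'] from rfl])]
      simp [show ("/" : String).toList = ['/'] from rfl, splitOn_slash]
    rw [hsplit]
    simp only [Option.getD_some]
    have hfold : ∀ (l : List (List Char)) (acc : List String),
        (l.map String.ofList).foldl (fun symbols part =>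
          if PySem.Str.isIn "[" part then
            symbols ++ [(PySem.List.pyGet? ((PySem.Str.splitMax? part "[" 1).getD []) 0).getD ""]
          else symbols ++ [part]) acc
        = acc ++ l.map (fun p => String.ofList (pvCut p)) := by
      intro l
      induction l with
      | nil => intro acc; simp
      | cons p r ih =>
        intro acc
        simp only [List.map_cons, List.foldl_cons]
        by_cases hp : PySem.Str.isIn "[" (String.ofList p) = true
        · rw [if_pos hp, ih]; rw [strip_eq_cut]; simp
        · rw [if_neg hp, ih]
          have hnm : '[' ∉ p := by
            intro hm
            apply hp
            rw [PySem.Str.isIn_iff_infix]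
            simp only [String.toList_ofList, show ("[" : String).toList = ['['] from rfl]
            exact (mem_iff_singleton_infix '[' p).mpr hm
          rw [cut_of_not_mem p hnm]
          simp
    rw [hfold]
    unfold PySem.Str.join
    rw [(scan_eq_join s.toList).1]
    simp [show ("/" : String).toList = ['/'] from rfl]
    congr 2
    apply List.map_congr_left
    intro p _
    simp [Function.comp]
  · rw [if_neg hs]
    have hns : '/' ∉ s.toList := by
      intro hm
      apply hs
      rw [PySem.Str.isIn_iff_infix]
      simp only [show ("/" : String).toList = ['/'] from rfl]
      exact (mem_iff_singleton_infix '/' s.toList).mpr hm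
    have hscan : pvScan false s.toList = pvCut s.toList := by
      rw [(scan_eq_join s.toList).1, split_no_slash s.toList hns]
      simp [PySem.Chars.join_singleton]
    rw [hscan]
    by_cases hb : PySem.Str.isIn "[" s = true
    · rw [if_pos hb]
      have := strip_eq_cut s.toList
      simpa using this
    · rw [if_neg hb]
      have hnb : '[' ∉ s.toList := by
        intro hm
        apply hb
        rw [PySem.Str.isIn_iff_infix]
        simp only [show ("[" : String).toList = ['['] from rfl]
        exact (mem_iff_singleton_infix '[' s.toList).mpr hm
      rw [cut_of_not_mem s.toList hnb]
      simp
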